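-- pv_equiv track=rewrite | github.com/jorgenavarro13/back_HackMTY25 | app/features.py | _dominant_period
-- ===== SOURCE A (Python) =====
-- REC_WINDOWS = {
--     7:  (6, 8),          # 7 ±1
--     30: (27, 33),        # 30 ±3
--     365:(358, 372),      # 365 ±7
-- }
--
-- def _dominant_period(days_diffs: list[int]) -> tuple[int | None, int]:
--     """
--     Dadas diferencias de días entre cargos, devuelve (periodicity_days, hits_en_ventana)
--     escogiendo la ventana que más hits tenga.
--     """
--     best_period = None
--     best_hits = 0
--     for p, (lo, hi) in REC_WINDOWS.items():
--         hits = sum(1 for d in days_diffs if lo <= d <= hi)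
--         if hits > best_hits:
--             best_hits = hits
--             best_period = p
--     return best_period, best_hits
-- ===== SOURCE B (Python) =====
-- def _dominant_period(days_diffs: list[int]) -> tuple[int | None, int]:
--     # One pass over days_diffs: classify each diff into its (disjoint) window
--     # and count per period; then pick the first period (7, 30, 365) whose
--     # count strictly beats the running best.
--     c7 = c30 = c365 = 0
--     for d in days_diffs:
--         if 6 <= d <= 8:
--             c7 += 1
--         elif 27 <= d <= 33:
--             c30 += 1
--         elif 358 <= d <= 372:
--             c365 += 1
--     best_period, best_hits = None, 0
--     for p, c in ((7, c7), (30, c30), (365, c365)):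
--         if c > best_hits:
--             best_period, best_hits = p, c
--     return best_period, best_hits
-- ===== Notes on version B (the rewrite author's own statement) =====
-- stated objective: alternative
-- what changed: Replaces the windows-by-diffs nested scan (three passes over days_diffs) with a single classifying pass building three counters, followed by a constant-size selection pass.
import Mathlib
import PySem

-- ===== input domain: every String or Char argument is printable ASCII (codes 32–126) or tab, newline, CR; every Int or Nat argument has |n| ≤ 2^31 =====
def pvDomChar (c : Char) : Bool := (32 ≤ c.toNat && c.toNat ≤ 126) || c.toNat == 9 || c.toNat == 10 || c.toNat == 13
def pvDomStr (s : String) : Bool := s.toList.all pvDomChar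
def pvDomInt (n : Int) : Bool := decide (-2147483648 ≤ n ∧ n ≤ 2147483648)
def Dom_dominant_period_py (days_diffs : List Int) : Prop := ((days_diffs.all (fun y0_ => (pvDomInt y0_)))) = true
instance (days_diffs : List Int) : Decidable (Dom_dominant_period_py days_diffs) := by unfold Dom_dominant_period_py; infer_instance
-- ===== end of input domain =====

-- B replaces A's three window-by-window scans of days_diffs with one classifying pass
-- building three counters plus a constant-size selection pass (different decomposition, same cost).


-- ===== PORT A =====
-- sum(1 for d in days_diffs if lo <= d <= hi)
def pvHitsA (days_diffs : List Int) (lo hi : Int) : Int :=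
  days_diffs.foldl (fun acc d => if lo ≤ d ∧ d ≤ hi then acc + 1 else acc) 0

-- for p, (lo, hi) in REC_WINDOWS.items(): … (insertion order 7, 30, 365)
def dominant_period_py (days_diffs : List Int) : Option Int × Int :=
  ([((7 : Int), ((6 : Int), (8 : Int))), (30, (27, 33)), (365, (358, 372))]).foldl
    (fun (st : Option Int × Int) pw =>
      let hits := pvHitsA days_diffs pw.2.1 pw.2.2
      if hits > st.2 then (some pw.1, hits) else st)
    (none, 0)

-- ===== PORT B =====
-- single pass: classify each d into its disjoint window, counting per period
def pvCounts (days_diffs : List Int) : Int × Int × Int :=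
  days_diffs.foldl
    (fun (c : Int × Int × Int) d =>
      if 6 ≤ d ∧ d ≤ 8 then (c.1 + 1, c.2.1, c.2.2)
      else if 27 ≤ d ∧ d ≤ 33 then (c.1, c.2.1 + 1, c.2.2)
      else if 358 ≤ d ∧ d ≤ 372 then (c.1, c.2.1, c.2.2 + 1)
      else c)
    (0, 0, 0)

def dominant_period_py_alt (days_diffs : List Int) : Option Int × Int :=
  let c := pvCounts days_diffs
  ([((7 : Int), c.1), (30, c.2.1), (365, c.2.2)]).foldl
    (fun (st : Option Int × Int) pc =>
      if pc.2 > st.2 then (some pc.1, pc.2) else st)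
    (none, 0)

-- ===== PRECONDITION & SPEC =====
def Spec_dominant_period_py (days_diffs : List Int) (out : Option Int × Int) : Prop := out = dominant_period_py_alt days_diffs
instance (days_diffs : List Int) (out : Option Int × Int) : Decidable (Spec_dominant_period_py days_diffs out) := by unfold Spec_dominant_period_py; infer_instance

-- ===== CLAIM (what is proved, stated in full; the proofs are below) =====
def Claim_equal_dominant_period_py : Prop := ∀ (days_diffs : List Int), Dom_dominant_period_py days_diffs → Spec_dominant_period_py days_diffs (dominant_period_py days_diffs)

-- ===== LEMMAS AND PROOFS =====

-- count of elements in [lo, hi], in recursive form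
def pvCnt (lo hi : Int) : List Int → Int
  | [] => 0
  | d :: xs => (if lo ≤ d ∧ d ≤ hi then 1 else 0) + pvCnt lo hi xs

theorem foldl_cnt (lo hi : Int) (xs : List Int) : ∀ (a : Int),
    xs.foldl (fun acc d => if lo ≤ d ∧ d ≤ hi then acc + 1 else acc) a = a + pvCnt lo hi xs := by
  induction xs with
  | nil => intro a; simp [pvCnt]
  | cons x xs ih =>
    intro a
    simp only [List.foldl_cons, pvCnt]
    rw [ih]
    split_ifs <;> omega

theorem hitsA_eq_cnt (xs : List Int) (lo hi : Int) : pvHitsA xs lo hi = pvCnt lo hi xs := by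
  have h := foldl_cnt lo hi xs 0
  simpa [pvHitsA] using h

theorem pvCounts_go (days_diffs : List Int) :
    ∀ (c : Int × Int × Int),
      days_diffs.foldl
        (fun (c : Int × Int × Int) d =>
          if 6 ≤ d ∧ d ≤ 8 then (c.1 + 1, c.2.1, c.2.2)
          else if 27 ≤ d ∧ d ≤ 33 then (c.1, c.2.1 + 1, c.2.2)
          else if 358 ≤ d ∧ d ≤ 372 then (c.1, c.2.1, c.2.2 + 1)
          else c) c
      = (c.1 + pvCnt 6 8 days_diffs,
         c.2.1 + pvCnt 27 33 days_diffs,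
         c.2.2 + pvCnt 358 372 days_diffs) := by
  induction days_diffs with
  | nil => intro c; simp [pvCnt]
  | cons x xs ih =>
    intro c
    simp only [List.foldl_cons, pvCnt]
    rw [ih]
    split_ifs <;> simp only [Prod.mk.injEq] <;> refine ⟨by omega, by omega, by omega⟩

theorem pvCounts_eq (days_diffs : List Int) :
    pvCounts days_diffs
      = (pvCnt 6 8 days_diffs, pvCnt 27 33 days_diffs, pvCnt 358 372 days_diffs) := by
  have h := pvCounts_go days_diffs (0, 0, 0)
  simpa [pvCounts] using h

-- ===== VERDICT (by name: the statement is the Claim_ definition above) =====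
theorem dominant_period_py_spec : Claim_equal_dominant_period_py := by
  intro days_diffs _
  unfold Spec_dominant_period_py dominant_period_py dominant_period_py_alt
  rw [pvCounts_eq]
  simp only [List.foldl_cons, List.foldl_nil, hitsA_eq_cnt]
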